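-- pv_equiv track=rewrite | github.com/gilesknap/peyote-pattern | peyote/patterns.py | flames
-- ===== SOURCE A (Python) =====
-- def flames(columns: int, rows: int, size: int = 5,
--            color1: int = 1, color2: int = 2, bg: int = 0) -> list[list[int]]:
--     """Upward-licking flames — alternating triangular tongues in two colors."""
--     period_c = size * 2
--     period_r = size * 2
--     grid = []
--     for r in range(rows):
--         row = []
--         for c in range(columns):
--             tile_r = r % period_r
--             tile_c = c % period_c
--             # Flame rises from bottom of tile (tile_r=period_r-1) to tip (tile_r=0).
--             # Width tapers: at tile_r=k from bottom, flame half-width = k // 2 + 1.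
--             from_bottom = period_r - 1 - tile_r
--             half_w = from_bottom // 2 + 1
--             # Two flame columns per period, offset — alternating colors
--             center1 = size // 2
--             center2 = size + size // 2
--             val = bg
--             if abs(tile_c - center1) < half_w:
--                 val = color1
--             if abs(tile_c - center2) < half_w:
--                 # Offset the phase vertically so flames alternate
--                 alt_from_bottom = (from_bottom + size) % period_r
--                 alt_half_w = alt_from_bottom // 2 + 1
--                 if abs(tile_c - center2) < alt_half_w:
--                     val = color2
--             row.append(val)
--         grid.append(row)
--     return grid
-- ===== SOURCE B (Python) =====
-- def flames(columns: int, rows: int, size: int = 5,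
--            color1: int = 1, color2: int = 2, bg: int = 0) -> list[list[int]]:
--     """Upward-licking flames via a precomputed period x period tile, looked up by modulo."""
--     period = size * 2
--
--     def tile_val(tile_r: int, tile_c: int) -> int:
--         from_bottom = period - 1 - tile_r
--         half_w = from_bottom // 2 + 1
--         center1 = size // 2
--         center2 = size + size // 2
--         val = bg
--         if abs(tile_c - center1) < half_w:
--             val = color1
--         if abs(tile_c - center2) < half_w:
--             alt_half_w = ((from_bottom + size) % period) // 2 + 1
--             if abs(tile_c - center2) < alt_half_w:
--                 val = color2
--         return val
--
--     # r % period <= r and c % period <= c, so only this many tile rows/cols are ever used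
--     tile = [[tile_val(tr, tc) for tc in range(min(columns, period))]
--             for tr in range(min(rows, period))]
--     grid = []
--     for r in range(rows):
--         row = []
--         for c in range(columns):
--             row.append(tile[r % period][c % period])
--         grid.append(row)
--     return grid
-- ===== Notes on version B (the rewrite author's own statement) =====
-- stated objective: alternative
-- what changed: B precomputes the per-cell flame arithmetic once into a period x period tile table and fills the grid purely by modulo lookups, instead of redoing the taper/phase arithmetic for every cell.
-- outside the precondition, e.g. on flames(2, 2, -1, 1, 2, 0): A returns [[0, 0], [0, 0]], B raises IndexError
import Mathlib
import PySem

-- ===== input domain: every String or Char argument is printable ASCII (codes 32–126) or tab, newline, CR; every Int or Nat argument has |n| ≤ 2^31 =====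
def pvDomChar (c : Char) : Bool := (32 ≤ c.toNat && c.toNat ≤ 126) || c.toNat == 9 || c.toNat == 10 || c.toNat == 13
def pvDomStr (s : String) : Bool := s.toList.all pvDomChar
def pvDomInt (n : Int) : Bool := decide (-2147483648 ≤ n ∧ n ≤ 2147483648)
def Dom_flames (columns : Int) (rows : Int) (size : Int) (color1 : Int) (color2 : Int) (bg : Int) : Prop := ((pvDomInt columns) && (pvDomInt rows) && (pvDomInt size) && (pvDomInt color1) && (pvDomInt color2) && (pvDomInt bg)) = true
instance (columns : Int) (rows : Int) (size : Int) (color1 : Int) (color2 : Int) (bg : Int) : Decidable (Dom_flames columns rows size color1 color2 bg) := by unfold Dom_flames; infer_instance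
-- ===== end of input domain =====

-- B precomputes the per-cell flame arithmetic into a period × period tile table and fills the
-- grid by modulo lookups (objective: alternative decomposition, same asymptotic cost).

-- ===== PORT A =====
def flames (columns : Int) (rows : Int) (size : Int) (color1 : Int) (color2 : Int) (bg : Int) : List (List Int) :=
  let period_c := size * 2
  let period_r := size * 2
  (PySem.List.pyRange 0 rows 1).foldl (fun grid r =>
    grid ++ [(PySem.List.pyRange 0 columns 1).foldl (fun row c =>
      let tile_r := PySem.Int.mod r period_r
      let tile_c := PySem.Int.mod c period_c
      let from_bottom := period_r - 1 - tile_r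
      let half_w := PySem.Int.floordiv from_bottom 2 + 1
      let center1 := PySem.Int.floordiv size 2
      let center2 := size + PySem.Int.floordiv size 2
      let val := bg
      let val := if |tile_c - center1| < half_w then color1 else val
      let val :=
        if |tile_c - center2| < half_w then
          let alt_from_bottom := PySem.Int.mod (from_bottom + size) period_r
          let alt_half_w := PySem.Int.floordiv alt_from_bottom 2 + 1
          if |tile_c - center2| < alt_half_w then color2 else val
        else val
      row ++ [val]) []]) []

-- ===== PORT B =====
-- Source B's inner helper tile_val (closure over size, colors, bg, period)
def flamesTileVal (size : Int) (color1 : Int) (color2 : Int) (bg : Int) (period : Int) (tile_r : Int) (tile_c : Int) : Int :=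
  let from_bottom := period - 1 - tile_r
  let half_w := PySem.Int.floordiv from_bottom 2 + 1
  let center1 := PySem.Int.floordiv size 2
  let center2 := size + PySem.Int.floordiv size 2
  let val := bg
  let val := if |tile_c - center1| < half_w then color1 else val
  let val :=
    if |tile_c - center2| < half_w then
      let alt_half_w := PySem.Int.floordiv (PySem.Int.mod (from_bottom + size) period) 2 + 1
      if |tile_c - center2| < alt_half_w then color2 else val
    else val
  val

def flames_alt (columns : Int) (rows : Int) (size : Int) (color1 : Int) (color2 : Int) (bg : Int) : List (List Int) :=
  let period := size * 2
  -- r % period ≤ r and c % period ≤ c, so only min rows/columns vs period tile rows/cols are ever used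
  let tile := (PySem.List.pyRange 0 (min rows period) 1).map (fun tr =>
    (PySem.List.pyRange 0 (min columns period) 1).map (fun tc => flamesTileVal size color1 color2 bg period tr tc))
  (PySem.List.pyRange 0 rows 1).foldl (fun grid r =>
    grid ++ [(PySem.List.pyRange 0 columns 1).foldl (fun row c =>
      -- tile[r % period][c % period]: index is in range whenever Pre_ holds (pyGetD default unreachable)
      row ++ [PySem.List.pyGetD (PySem.List.pyGetD tile (PySem.Int.mod r period) []) (PySem.Int.mod c period) 0]) []]) []

-- ===== PRECONDITION & SPEC =====
-- Pre_ excludes size ≤ 0 with a non-empty grid: at size = 0 A raises ZeroDivisionError, and at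
-- size < 0 A's value comes from Python's negative-divisor modulo while B's natural tile is empty
-- and raises IndexError.
def Pre_flames (columns : Int) (rows : Int) (size : Int) (color1 : Int) (color2 : Int) (bg : Int) : Prop :=
  0 < size ∨ rows ≤ 0 ∨ columns ≤ 0
instance (columns : Int) (rows : Int) (size : Int) (color1 : Int) (color2 : Int) (bg : Int) : Decidable (Pre_flames columns rows size color1 color2 bg) := by unfold Pre_flames; infer_instance

def pvWitness_flames : Int × Int × Int × Int × Int × Int := (3, 4, 2, 1, 2, 0)

def Spec_flames (columns : Int) (rows : Int) (size : Int) (color1 : Int) (color2 : Int) (bg : Int) (out : List (List Int)) : Prop := out = flames_alt columns rows size color1 color2 bg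
instance (columns : Int) (rows : Int) (size : Int) (color1 : Int) (color2 : Int) (bg : Int) (out : List (List Int)) : Decidable (Spec_flames columns rows size color1 color2 bg out) := by unfold Spec_flames; infer_instance

-- ===== CLAIM (what is proved, stated in full; the proofs are below) =====
def Claim_equal_flames : Prop := ∀ (columns : Int) (rows : Int) (size : Int) (color1 : Int) (color2 : Int) (bg : Int), Dom_flames columns rows size color1 color2 bg → Pre_flames columns rows size color1 color2 bg → Spec_flames columns rows size color1 color2 bg (flames columns rows size color1 color2 bg)

-- ===== LEMMAS AND PROOFS =====

theorem flames_mod_lt_min (x bound p : Int) (hp : 0 < p) (hx : 0 ≤ x) (hxb : x < bound) :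
    PySem.Int.mod x p < min bound p := by
  have h1 := PySem.Int.mod_nonneg x hp
  have h2 := PySem.Int.mod_lt x hp
  by_cases hlt : x < p
  · have : PySem.Int.mod x p = x := by
      rw [PySem.Int.mod_eq_emod_of_pos hp, Int.emod_eq_of_lt hx hlt]
    omega
  · omega

theorem flames_cell_eq (columns rows size color1 color2 bg r c : Int) (hs : 0 < size)
    (hr : 0 ≤ r) (hrb : r < rows) (hc : 0 ≤ c) (hcb : c < columns) :
    PySem.List.pyGetD
      (PySem.List.pyGetD
        ((PySem.List.pyRange 0 (min rows (size * 2)) 1).map (fun tr =>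
          (PySem.List.pyRange 0 (min columns (size * 2)) 1).map (fun tc => flamesTileVal size color1 color2 bg (size * 2) tr tc)))
        (PySem.Int.mod r (size * 2)) [])
      (PySem.Int.mod c (size * 2)) 0
    = flamesTileVal size color1 color2 bg (size * 2) (PySem.Int.mod r (size * 2)) (PySem.Int.mod c (size * 2)) := by
  have hp : (0 : Int) < size * 2 := by omega
  rw [PySem.List.pyGetD_map_pyRange_of_nonneg _ _ _ _ (PySem.Int.mod_nonneg r hp) (flames_mod_lt_min r rows _ hp hr hrb),
      PySem.List.pyGetD_map_pyRange_of_nonneg _ _ _ _ (PySem.Int.mod_nonneg c hp) (flames_mod_lt_min c columns _ hp hc hcb)]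

-- ===== VERDICT (by name: the statement is the Claim_ definition above) =====
theorem flames_spec : Claim_equal_flames := by
  intro columns rows size color1 color2 bg _ hpre
  unfold Spec_flames flames flames_alt
  simp only [PySem.List.foldl_append_singleton_eq_map, List.nil_append]
  apply List.map_congr_left
  intro r hr
  apply List.map_congr_left
  intro c hc
  rw [PySem.List.mem_pyRange_one] at hr hc
  rcases hpre with hs | hrows | hcols
  · rw [flames_cell_eq columns rows size color1 color2 bg r c hs hr.1 hr.2 hc.1 hc.2]
    rfl
  · omega
  · omega
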